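-- pv_equiv track=rewrite | github.com/Vesperalin/SIiIW-2022-Text-Classification | data_analyzer.py | calculate_words
-- ===== SOURCE A (Python) =====
-- def calculate_words(temp_dict: dict[int, dict[str, str]]) -> dict[str, int]:
--     counts_of_words = {}
--
--     for book in temp_dict.values():
--         words = book['summary'].split()
--         for word in words:
--             if word.lower() in counts_of_words:
--                 counts_of_words[word.lower()] += 1
--             elif if_is_word(word.lower()):
--                 counts_of_words[word.lower()] = 1
--
--     return counts_of_words
--
-- def if_is_word(text: str) -> bool:
--     for i in range(len(text)):
--         if (text[i].lower() < "a" or text[i].lower() > "z") and text[i] != "'":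
--             return False
--     return True
-- ===== SOURCE B (Python) =====
-- def calculate_words(temp_dict: dict[int, dict[str, str]]) -> dict[str, int]:
--     tokens = [word.lower() for book in temp_dict.values()
--               for word in book['summary'].split()]
--     valid = [t for t in tokens
--              if all("a" <= c <= "z" or c == "'" for c in t)]
--     return {w: valid.count(w) for w in dict.fromkeys(valid)}
-- ===== Notes on version B (the rewrite author's own statement) =====
-- stated objective: simpler
-- what changed: Replaces A's nested loops that incrementally update a dict via a membership-then-validity branch (with the char-loop helper if_is_word) by a three-step pipeline: flatten all summaries into one lowercased token list, filter tokens whose characters are all a-z or apostrophe, then build the result as {w: valid.count(w)} over the first-occurrence dedup of the valid tokens.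
import Mathlib
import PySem

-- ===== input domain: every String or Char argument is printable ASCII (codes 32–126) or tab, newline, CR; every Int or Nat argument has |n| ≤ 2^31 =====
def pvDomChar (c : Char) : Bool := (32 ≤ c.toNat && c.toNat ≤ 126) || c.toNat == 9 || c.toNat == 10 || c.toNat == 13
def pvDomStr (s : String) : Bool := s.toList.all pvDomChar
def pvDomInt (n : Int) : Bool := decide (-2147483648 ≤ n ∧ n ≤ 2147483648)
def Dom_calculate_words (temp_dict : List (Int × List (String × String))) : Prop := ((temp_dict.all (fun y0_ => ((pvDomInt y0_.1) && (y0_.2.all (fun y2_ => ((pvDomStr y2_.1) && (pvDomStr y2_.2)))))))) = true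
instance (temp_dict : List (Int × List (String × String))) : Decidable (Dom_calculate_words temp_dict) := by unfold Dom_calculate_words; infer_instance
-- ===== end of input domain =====

-- B counts the lowercased word tokens in one flatten-filter-dedup-count pipeline instead of A's
-- nested loops with an incremental membership/validity-branching dict update (objective: simpler).

-- ===== PORT A =====
-- for i in range(len(text)): early 'return False' = structural recursion over the characters;
-- text[i].lower() is PySem.Chars.lowerChar (exact on the ASCII domain); 1-char string < / > is codepoint order
def if_is_word_go : List Char → Bool
  | [] => true
  | c :: rest =>
    if ((decide (PySem.Chars.lowerChar c < 'a') || decide ('z' < PySem.Chars.lowerChar c))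
        && (c != '\'')) then false
    else if_is_word_go rest

def if_is_word (text : String) : Bool := if_is_word_go text.toList

def calculate_words (temp_dict : List (Int × List (String × String))) : List (String × Int) :=
  (((PySem.Dict.ofList temp_dict).values).foldl
    (fun counts book =>
      (PySem.Str.split₀ ((PySem.Dict.ofList book).getD "summary" "")).foldl
        (fun counts word =>
          if counts.contains (PySem.Str.lower word) then
            counts.insert (PySem.Str.lower word) (counts.getD (PySem.Str.lower word) 0 + 1)
          else if if_is_word (PySem.Str.lower word) then
            counts.insert (PySem.Str.lower word) 1
          else counts)
        counts)
    PySem.Dict.empty).items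

-- ===== PORT B =====
-- all("a" <= c <= "z" or c == "'" for c in t)
def pyIsWordChar (c : Char) : Bool := (decide ('a' ≤ c) && decide (c ≤ 'z')) || (c == '\'')

def calculate_words_alt (temp_dict : List (Int × List (String × String))) : List (String × Int) :=
  let tokens := ((PySem.Dict.ofList temp_dict).values).flatMap
      (fun book => (PySem.Str.split₀ ((PySem.Dict.ofList book).getD "summary" "")).map PySem.Str.lower)
  let valid := tokens.filter (fun t => t.toList.all pyIsWordChar)
  (PySem.List.dedup valid).map (fun w => (w, (PySem.List.count valid w : Int)))

-- ===== PRECONDITION & SPEC =====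
-- Pre_ excludes exactly the inputs where some book dict lacks the key 'summary': there Python A raises KeyError.
def Pre_calculate_words (temp_dict : List (Int × List (String × String))) : Prop :=
  ((PySem.Dict.ofList temp_dict).values.all (fun book => (PySem.Dict.ofList book).contains "summary")) = true
instance (temp_dict : List (Int × List (String × String))) : Decidable (Pre_calculate_words temp_dict) := by unfold Pre_calculate_words; infer_instance

def pvWitness_calculate_words : (List (Int × List (String × String))) :=
  [(1, [("summary", "A b a b's !x")]), (2, [("summary", "b C"), ("title", "t")])]

def Spec_calculate_words (temp_dict : List (Int × List (String × String))) (out : List (String × Int)) : Prop := out = calculate_words_alt temp_dict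
instance (temp_dict : List (Int × List (String × String))) (out : List (String × Int)) : Decidable (Spec_calculate_words temp_dict out) := by unfold Spec_calculate_words; infer_instance

-- ===== CLAIM (what is proved, stated in full; the proofs are below) =====
def Claim_equal_calculate_words : Prop := ∀ (temp_dict : List (Int × List (String × String))), Dom_calculate_words temp_dict → Pre_calculate_words temp_dict → Spec_calculate_words temp_dict (calculate_words temp_dict)

-- ===== LEMMAS AND PROOFS =====

theorem lowerChar_idem (c : Char) :
    PySem.Chars.lowerChar (PySem.Chars.lowerChar c) = PySem.Chars.lowerChar c := by
  unfold PySem.Chars.lowerChar PySem.Chars.isupper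
  by_cases hA : 'A' ≤ c <;> by_cases hZ : c ≤ 'Z' <;> simp [hA, hZ]
  · intro _ h2
    exfalso
    have h3 : c.toNat ≤ 90 := hZ
    have h1 : 65 ≤ c.toNat := hA
    have ht : (Char.ofNat (c.toNat + 32)).toNat = c.toNat + 32 := by
      rw [Char.toNat_ofNat, if_pos]; exact Or.inl (by omega)
    have h4 : (Char.ofNat (c.toNat + 32)).toNat ≤ 90 := h2
    omega

-- on an already-lowercased string A's character test agrees with B's
theorem go_eq_all (cs : List Char) :
    if_is_word_go (cs.map PySem.Chars.lowerChar) = (cs.map PySem.Chars.lowerChar).all pyIsWordChar := by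
  induction cs with
  | nil => rfl
  | cons c rest ih =>
    simp only [List.map_cons, if_is_word_go, List.all_cons, lowerChar_idem]
    by_cases h1 : PySem.Chars.lowerChar c < 'a' <;>
      by_cases h2 : 'z' < PySem.Chars.lowerChar c <;>
      by_cases h3 : PySem.Chars.lowerChar c = '\'' <;>
      simp [pyIsWordChar, h1, h2, h3, not_lt.mp, ih]

theorem word_eq (w : String) :
    if_is_word (PySem.Str.lower w) = (PySem.Str.lower w).toList.all pyIsWordChar := by
  have : (PySem.Str.lower w).toList = w.toList.map PySem.Chars.lowerChar := by
    simp [PySem.Str.toList_lower, PySem.Chars.lower]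
  rw [if_is_word, this, go_eq_all]

-- A's dict loop over a word list = a plain counting loop over the lowercased-and-filtered words
theorem foldA_eq (ws : List String) (d : PySem.Dict String Int)
    (hk : ∀ k, d.contains k = true → k.toList.all pyIsWordChar = true) :
    ws.foldl
      (fun counts word =>
        if counts.contains (PySem.Str.lower word) then
          counts.insert (PySem.Str.lower word) (counts.getD (PySem.Str.lower word) 0 + 1)
        else if if_is_word (PySem.Str.lower word) then
          counts.insert (PySem.Str.lower word) 1
        else counts) d
    = ((ws.map PySem.Str.lower).filter (fun t => t.toList.all pyIsWordChar)).foldl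
        (fun d t => d.insert t (d.getD t 0 + 1)) d := by
  induction ws generalizing d with
  | nil => rfl
  | cons w ws ih =>
    simp only [List.foldl_cons, List.map_cons, List.filter_cons]
    by_cases hv : (PySem.Str.lower w).toList.all pyIsWordChar = true
    · have hstep :
          (if d.contains (PySem.Str.lower w) then
            d.insert (PySem.Str.lower w) (d.getD (PySem.Str.lower w) 0 + 1)
          else if if_is_word (PySem.Str.lower w) then
            d.insert (PySem.Str.lower w) 1
          else d)
          = d.insert (PySem.Str.lower w) (d.getD (PySem.Str.lower w) 0 + 1) := by
        by_cases hc : d.contains (PySem.Str.lower w) = true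
        · simp [hc]
        · have h0 : d.getD (PySem.Str.lower w) 0 = 0 :=
            PySem.Dict.getD_of_not_contains _ _ (Bool.eq_false_iff.mpr hc)
          simp only [hc, Bool.false_eq_true, word_eq, hv, if_true, h0,
            zero_add, if_neg, not_false_iff]
      rw [hstep, hv, if_pos rfl, List.foldl_cons, ih]
      intro k hkc
      rw [PySem.Dict.contains_insert] at hkc
      simp only [Bool.or_eq_true, beq_iff_eq] at hkc
      rcases hkc with h | h
      · exact h ▸ hv
      · exact hk k h
    · have hc : d.contains (PySem.Str.lower w) = false := by
        by_contra h
        exact hv (hk _ (Bool.of_not_eq_false h))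
      have hw : if_is_word (PySem.Str.lower w) = false := by
        rw [word_eq]; exact Bool.eq_false_iff.mpr hv
      simp only [hc, hw, hv, if_neg, Bool.false_eq_true, not_false_iff]
      exact ih d hk

-- ===== VERDICT (by name: the statement is the Claim_ definition above) =====
theorem calculate_words_spec : Claim_equal_calculate_words := by
  intro temp_dict _ _
  unfold Spec_calculate_words calculate_words calculate_words_alt
  rw [← List.foldl_flatMap, foldA_eq _ _ (fun k hk => by simp [PySem.Dict.contains_empty] at hk),
    PySem.Dict.foldl_insert_getD_add_one_eq_counter, PySem.Dict.items_counter]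
  simp only [PySem.List.dedup_eq_ofList, PySem.List.count_eq, ← List.map_flatMap]
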